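-- pv_equiv track=rewrite | github.com/hanny9494-ai/culinary-mind | pipeline/l2a/normalize.py | build_batches
-- ===== SOURCE A (Python) =====
-- from collections import defaultdict
--
-- def chunk_list(lst, size):
--     return [lst[i:i + size] for i in range(0, len(lst), size)]
--
-- def build_batches(ingredients, batch_size, done_batch_keys):
--     """Build batches with unique keys for resume support."""
--     groups = defaultdict(list)
--     for ing in ingredients:
--         cat = ing.get("category_guess", "other")
--         groups[cat].append(ing)
--     batches = []
--     for cat, items in sorted(groups.items()):
--         for i, chunk in enumerate(chunk_list(items, batch_size)):
--             batch_key = f"{cat}_{i}"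
--             if batch_key in done_batch_keys:
--                 continue
--             batches.append((batch_key, cat, chunk))
--     return batches
-- ===== SOURCE B (Python) =====
-- from itertools import groupby
--
-- def build_batches(ingredients, batch_size, done_batch_keys):
--     """Build batches with unique keys for resume support (sort + groupby)."""
--     key = lambda ing: ing.get("category_guess", "other")
--     batches = []
--     for cat, grp in groupby(sorted(ingredients, key=key), key=key):
--         items = list(grp)
--         chunks = [items[i:i + batch_size] for i in range(0, len(items), batch_size)]
--         batches.extend((f"{cat}_{i}", cat, chunk)
--                        for i, chunk in enumerate(chunks)
--                        if f"{cat}_{i}" not in done_batch_keys)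
--     return batches
-- ===== Notes on version B (the rewrite author's own statement) =====
-- stated objective: idiomatic
-- what changed: Replaces the defaultdict hash-grouping followed by sorted(groups.items()) with a single stable sort of the ingredients by category and itertools.groupby over the sorted list.
import Mathlib
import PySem

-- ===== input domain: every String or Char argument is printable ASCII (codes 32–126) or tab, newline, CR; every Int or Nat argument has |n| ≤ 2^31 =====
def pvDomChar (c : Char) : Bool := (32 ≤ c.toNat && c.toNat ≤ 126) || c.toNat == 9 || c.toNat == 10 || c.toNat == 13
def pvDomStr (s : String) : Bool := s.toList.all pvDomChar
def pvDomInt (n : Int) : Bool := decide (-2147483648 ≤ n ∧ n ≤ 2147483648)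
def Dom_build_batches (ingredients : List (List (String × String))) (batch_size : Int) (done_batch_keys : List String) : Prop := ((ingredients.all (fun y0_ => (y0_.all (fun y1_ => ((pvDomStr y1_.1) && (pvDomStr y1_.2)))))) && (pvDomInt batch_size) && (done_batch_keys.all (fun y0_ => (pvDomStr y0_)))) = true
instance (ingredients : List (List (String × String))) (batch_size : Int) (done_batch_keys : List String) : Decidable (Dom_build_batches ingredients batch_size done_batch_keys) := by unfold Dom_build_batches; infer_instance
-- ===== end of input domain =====

-- B replaces A's defaultdict grouping + sorted(items) by a stable sort on the category followed by
-- itertools.groupby (objective: idiomatic); equivalence of the RETURN value is proved on Pre_.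

-- ===== PORT A =====
-- ing.get("category_guess", "other") on the Python dict `ing` (an assoc list by the type convention)
def pvKey (ing : List (String × String)) : String :=
  (PySem.Dict.ofList ing).getD "category_guess" "other"

def chunk_list (lst : List (List (String × String))) (size : Int) :
    List (List (List (String × String))) :=
  (PySem.List.pyRange 0 (lst.length : Int) size).map
    (fun i => PySem.List.slice lst (some i) (some (i + size)))

-- Python sorts groups.items() by tuple comparison; the dict's keys are distinct, so the
-- comparison never reaches the second component: it is a sort by the category string.
def build_batches (ingredients : List (List (String × String))) (batch_size : Int) (done_batch_keys : List String) : List (String × String × (List (List (String × String)))) :=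
  (PySem.List.sorted
      (ingredients.foldl
        (fun g ing => g.modify (pvKey ing) [] (fun v => v ++ [ing]))
        PySem.Dict.empty).items
      (fun p => p.1)).foldl
    (fun batches p =>
      (PySem.List.enumerate (chunk_list p.2 batch_size) 0).foldl
        (fun batches ic =>
          if done_batch_keys.contains (p.1 ++ "_" ++ PySem.Int.toStr ic.1) then batches
          else batches ++ [(p.1 ++ "_" ++ PySem.Int.toStr ic.1, p.1, ic.2)])
        batches)
    []

-- ===== PORT B =====
-- itertools.groupby with the key already applied: adjacent runs of equal key (ported by hand, exact)
def pyGroupby (key : List (String × String) → String) :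
    List (List (String × String)) → List (String × List (List (String × String)))
  | [] => []
  | x :: xs =>
    (key x, x :: xs.takeWhile (fun y => key y == key x)) ::
      pyGroupby key (xs.dropWhile (fun y => key y == key x))
termination_by l => l.length
decreasing_by simpa using Nat.lt_succ_of_le (List.length_dropWhile_le _ xs)

def build_batches_alt (ingredients : List (List (String × String))) (batch_size : Int) (done_batch_keys : List String) : List (String × String × (List (List (String × String)))) :=
  (pyGroupby pvKey (PySem.List.sorted ingredients pvKey)).foldl
    (fun batches p =>
      batches ++
        ((PySem.List.enumerate
              ((PySem.List.pyRange 0 (p.2.length : Int) batch_size).map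
                (fun i => PySem.List.slice p.2 (some i) (some (i + batch_size)))) 0).filter
            (fun ic => !(done_batch_keys.contains (p.1 ++ "_" ++ PySem.Int.toStr ic.1)))).map
          (fun ic => (p.1 ++ "_" ++ PySem.Int.toStr ic.1, p.1, ic.2)))
    []

-- ===== PRECONDITION & SPEC =====
-- A raises ValueError (range() with step 0) when batch_size = 0 and there is at least one
-- ingredient; Pre_ excludes exactly those inputs (B raises there too).
def Pre_build_batches (ingredients : List (List (String × String))) (batch_size : Int) (done_batch_keys : List String) : Prop :=
  batch_size ≠ 0 ∨ ingredients = []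
instance (ingredients : List (List (String × String))) (batch_size : Int) (done_batch_keys : List String) : Decidable (Pre_build_batches ingredients batch_size done_batch_keys) := by unfold Pre_build_batches; infer_instance
def pvWitness_build_batches : (List (List (String × String))) × Int × List String :=
  ([[("category_guess", "veg"), ("name", "x")], [("name", "y")]], 2, ["other_0"])

def Spec_build_batches (ingredients : List (List (String × String))) (batch_size : Int) (done_batch_keys : List String) (out : List (String × String × (List (List (String × String))))) : Prop := out = build_batches_alt ingredients batch_size done_batch_keys
instance (ingredients : List (List (String × String))) (batch_size : Int) (done_batch_keys : List String) (out : List (String × String × (List (List (String × String))))) : Decidable (Spec_build_batches ingredients batch_size done_batch_keys out) := by unfold Spec_build_batches; infer_instance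

-- ===== CLAIM (what is proved, stated in full; the proofs are below) =====
def Claim_equal_build_batches : Prop := ∀ (ingredients : List (List (String × String))) (batch_size : Int) (done_batch_keys : List String), Dom_build_batches ingredients batch_size done_batch_keys → Pre_build_batches ingredients batch_size done_batch_keys → Spec_build_batches ingredients batch_size done_batch_keys (build_batches ingredients batch_size done_batch_keys)

-- ===== LEMMAS AND PROOFS =====

-- Step 1: the grouping dict of A, as an items list.
theorem itemsA_eq (ings : List (List (String × String))) :
    (ings.foldl (fun g ing => g.modify (pvKey ing) [] (fun v => v ++ [ing]))
        PySem.Dict.empty).items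
      = (PySem.List.dedup (ings.map pvKey)).map
          (fun c => (c, ings.filter (fun i => pvKey i == c))) := by
  have hnd : (ings.foldl (fun g ing => g.modify (pvKey ing) [] (fun v => v ++ [ing]))
      PySem.Dict.empty).keys.Nodup :=
    PySem.Dict.nodup_keys_foldl_modify_key ings pvKey [] (fun _ ing v => v ++ [ing]) _
      PySem.Dict.nodup_keys_empty
  rw [PySem.Dict.items_eq_map_keys _ hnd []]
  rw [PySem.Dict.keys_foldl_modify_key ings pvKey [] (fun _ ing v => v ++ [ing])]
  have hkeys : PySem.Set.update (PySem.Dict.empty : PySem.Dict String (List (List (String × String)))).keys (ings.map pvKey)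
      = PySem.List.dedup (ings.map pvKey) := by
    simp [PySem.Dict.keys_empty, PySem.Set.update_nil_left]
  rw [hkeys]
  apply List.map_congr_left
  intro c hc
  have hfold : ings.foldl (fun g ing => g.modify (pvKey ing) [] (fun v => v ++ [ing])) PySem.Dict.empty
      = (ings.map (fun i => (pvKey i, i))).foldl (fun d p => d.modify p.1 [] (fun v => v ++ [p.2])) PySem.Dict.empty := by
    rw [List.foldl_map]
  rw [hfold, PySem.Dict.getD_foldl_modify_append]
  simp [List.filter_map, Function.comp_def]

-- unfolding equations for PySem's insertion step
theorem insertBy_nil (before : List (String × String) → List (String × String) → Bool) (x : List (String × String)) :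
    PySem.List.insertBy before x [] = [x] := rfl
theorem insertBy_cons (before : List (String × String) → List (String × String) → Bool) (x y : List (String × String)) (ys : List (List (String × String))) :
    PySem.List.insertBy before x (y :: ys) = if before x y then x :: y :: ys else y :: PySem.List.insertBy before x ys := rfl

-- filtering one key commutes with a stable insertion into a key-sorted accumulator
theorem insertBy_filter (c : String) (x : List (String × String))
    (acc : List (List (String × String)))
    (h : acc.Pairwise (fun a b => pvKey a ≤ pvKey b)) :
    (PySem.List.insertBy (fun a b => decide (pvKey a < pvKey b)) x acc).filter
        (fun y => pvKey y == c)
      = if pvKey x == c then acc.filter (fun y => pvKey y == c) ++ [x]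
        else acc.filter (fun y => pvKey y == c) := by
  induction acc with
  | nil => by_cases hc : pvKey x == c <;> simp [insertBy_nil, List.filter, hc]
  | cons y ys ih =>
    rw [insertBy_cons]
    rcases List.pairwise_cons.mp h with ⟨hy, hys⟩
    by_cases hlt : pvKey x < pvKey y
    · simp only [decide_eq_true_eq, hlt, if_pos]
      by_cases hc : pvKey x == c
      · have hcc : pvKey x = c := by simpa using hc
        have hnil : (y :: ys).filter (fun z => pvKey z == c) = [] := by
          apply List.filter_eq_nil_iff.mpr
          intro z hz
          have hzk : pvKey y ≤ pvKey z := by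
            rcases List.mem_cons.mp hz with rfl | hz
            · exact le_refl _
            · exact hy z hz
          have : c < pvKey z := lt_of_lt_of_le (hcc ▸ hlt) hzk
          simp [ne_of_gt this]
        rw [List.filter_cons_of_pos (by simpa using hc), hnil]
        simp [hc]
      · rw [List.filter_cons_of_neg (by simpa using hc)]
        simp [hc]
    · simp only [decide_eq_true_eq, hlt, if_false]
      by_cases hyc : pvKey y == c
      · rw [List.filter_cons_of_pos (by simpa using hyc), List.filter_cons_of_pos (by simpa using hyc), ih hys]
        by_cases hc : pvKey x == c <;> simp [hc]
      · rw [List.filter_cons_of_neg (by simpa using hyc), List.filter_cons_of_neg (by simpa using hyc), ih hys]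

theorem foldl_ins_filter (c : String) (xs : List (List (String × String))) :
    ∀ acc : List (List (String × String)), acc.Pairwise (fun a b => pvKey a ≤ pvKey b) →
    (xs.foldl (fun acc x => PySem.List.insertBy (fun a b => decide (pvKey a < pvKey b)) x acc) acc).filter (fun y => pvKey y == c)
      = acc.filter (fun y => pvKey y == c) ++ xs.filter (fun y => pvKey y == c) := by
  induction xs with
  | nil => intro acc _; simp
  | cons x xs ih =>
    intro acc hacc
    rw [List.foldl_cons, ih _ (PySem.List.insertBy_pairwise_le pvKey x acc hacc),
      insertBy_filter c x acc hacc]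
    by_cases hc : pvKey x == c
    · rw [List.filter_cons_of_pos (by simpa using hc)]
      simp [hc]
    · rw [List.filter_cons_of_neg (by simpa using hc)]
      simp [hc]

-- STABILITY: the stable sort does not change the subsequence of any one category.
theorem filter_sorted (ings : List (List (String × String))) (c : String) :
    (PySem.List.sorted ings pvKey).filter (fun y => pvKey y == c)
      = ings.filter (fun y => pvKey y == c) := by
  rw [PySem.List.sorted_eq_foldl_insertBy, foldl_ins_filter c ings [] (by simp)]
  simp

-- all elements after the initial equal-key run have strictly larger key
theorem drop_gt (k : String) (xs : List (List (String × String)))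
    (hle : ∀ y ∈ xs, k ≤ pvKey y) (hpw : (xs.map pvKey).Pairwise (fun a b => a ≤ b)) :
    ∀ z ∈ xs.dropWhile (fun y => pvKey y == k), k < pvKey z := by
  induction xs with
  | nil => simp
  | cons x xs ih =>
    rw [List.map_cons, List.pairwise_cons] at hpw
    by_cases hx : pvKey x == k
    · rw [List.dropWhile_cons, if_pos hx]
      exact ih (fun y hy => hle y (List.mem_cons_of_mem _ hy)) hpw.2
    · rw [List.dropWhile_cons, if_neg hx]
      intro z hz
      have hkx : k < pvKey x := by
        have hne : pvKey x ≠ k := fun e => hx (by simp [e])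
        exact lt_of_le_of_ne (hle x List.mem_cons_self) (Ne.symm hne)
      rcases List.mem_cons.mp hz with rfl | hz
      · exact hkx
      · exact lt_of_lt_of_le hkx (hpw.1 _ (List.mem_map_of_mem hz))

-- groupby of a key-sorted list, fully characterised
theorem groupby_eq (S : List (List (String × String)))
    (h : (S.map pvKey).Pairwise (fun a b => a ≤ b)) :
    pyGroupby pvKey S
      = (PySem.List.dedup (S.map pvKey)).map
          (fun c => (c, S.filter (fun i => pvKey i == c))) := by
  induction S using pyGroupby.induct pvKey with
  | case1 => simp [pyGroupby, PySem.List.dedup]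
  | case2 x xs ih =>
    rw [List.map_cons, List.pairwise_cons] at h
    have hle : ∀ y ∈ xs, pvKey x ≤ pvKey y := fun y hy => h.1 _ (List.mem_map_of_mem hy)
    set k := pvKey x with hk
    set t := xs.takeWhile (fun y => pvKey y == k) with htdef
    set r := xs.dropWhile (fun y => pvKey y == k) with hrdef
    have hxs : t ++ r = xs := List.takeWhile_append_dropWhile
    have ht : ∀ y ∈ t, pvKey y = k := by
      intro y hy
      have hy' : y ∈ xs.takeWhile (fun y => pvKey y == k) := htdef ▸ hy
      have hp := List.mem_takeWhile_imp hy'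
      exact eq_of_beq hp
    have hr : ∀ z ∈ r, k < pvKey z := drop_gt k xs hle h.2
    have hpr : (r.map pvKey).Pairwise (fun a b => a ≤ b) :=
      h.2.sublist ((List.dropWhile_sublist _).map pvKey)
    have ha : PySem.List.dedup ((x :: xs).map pvKey) = k :: PySem.List.dedup (r.map pvKey) := by
      have h1 : (x :: xs).map pvKey = k :: (t.map pvKey ++ r.map pvKey) := by
        rw [List.map_cons, ← hxs, List.map_append]
      rw [h1]
      simp only [PySem.List.dedup, PySem.Set.ofList_cons, PySem.Set.ofList_append,
        PySem.Set.update_eq_append_filter, PySem.Set.discard]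
      have h2 : (PySem.Set.ofList (t.map pvKey)).filter (fun y => !(y == k)) = [] := by
        apply List.filter_eq_nil_iff.mpr
        intro y hy
        have : y = k := by
          rcases List.mem_map.mp ((PySem.Set.mem_ofList _ _).mp hy) with ⟨z, hz, rfl⟩
          exact ht z hz
        simp [this]
      have h3 : ∀ y ∈ PySem.Set.ofList (r.map pvKey), k < y := by
        intro y hy
        rcases List.mem_map.mp ((PySem.Set.mem_ofList _ _).mp hy) with ⟨z, hz, rfl⟩
        exact hr z hz
      have h4 : (PySem.Set.ofList (r.map pvKey)).filter
          (fun y => !(PySem.Set.ofList (t.map pvKey)).contains y) = PySem.Set.ofList (r.map pvKey) := by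
        apply List.filter_eq_self.mpr
        intro y hy
        have : y ∉ PySem.Set.ofList (t.map pvKey) := by
          intro hmem
          rcases List.mem_map.mp ((PySem.Set.mem_ofList _ _).mp hmem) with ⟨z, hz, hzy⟩
          exact absurd (hzy ▸ ht z hz) (ne_of_gt (h3 y hy))
        simpa [PySem.Set.contains, List.contains_iff_mem] using this
      rw [List.filter_append, h2, List.nil_append, h4]
      have h5 : (PySem.Set.ofList (r.map pvKey)).filter (fun y => !(y == k)) = PySem.Set.ofList (r.map pvKey) := by
        apply List.filter_eq_self.mpr
        intro y hy
        simpa using ne_of_gt (h3 y hy)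
      rw [h5]
    rw [pyGroupby, ha, List.map_cons]
    congr 1
    · have hfx : (x :: xs).filter (fun i => pvKey i == k) = x :: t := by
        rw [List.filter_cons_of_pos (by simp [hk])]
        congr 1
        rw [← hxs, List.filter_append]
        have h6 : t.filter (fun i => pvKey i == k) = t :=
          List.filter_eq_self.mpr (fun y hy => by simp [ht y hy])
        have h7 : r.filter (fun i => pvKey i == k) = [] :=
          List.filter_eq_nil_iff.mpr (fun z hz => by simpa using ne_of_gt (hr z hz))
        rw [h6, h7, List.append_nil]
      rw [hfx]
    · rw [ih hpr]
      apply List.map_congr_left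
      intro c hc
      have hck : k < c := by
        rcases List.mem_map.mp ((PySem.List.mem_dedup _ _).mp hc) with ⟨z, hz, rfl⟩
        exact hr z hz
      have : (x :: xs).filter (fun i => pvKey i == c) = r.filter (fun i => pvKey i == c) := by
        rw [List.filter_cons_of_neg (by simpa [hk] using ne_of_lt hck), ← hxs, List.filter_append]
        have h8 : t.filter (fun i => pvKey i == c) = [] :=
          List.filter_eq_nil_iff.mpr (fun y hy => by simp [ht y hy]; exact ne_of_lt hck)
        rw [h8, List.nil_append]
      rw [this]

-- PySem's dedup (first occurrences) is a sublist of its argument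
theorem ofList_sublist (l : List String) : (PySem.Set.ofList l).Sublist l := by
  induction l with
  | nil => simp [PySem.Set.ofList_nil]
  | cons x xs ih =>
    rw [PySem.Set.ofList_cons]
    exact List.Sublist.cons₂ x (List.Sublist.trans (by simp [PySem.Set.discard, List.filter_sublist]) ih)

-- the two group sequences coincide
theorem sorted_items_eq_groupby (ings : List (List (String × String))) :
    PySem.List.sorted
        ((ings.foldl (fun g ing => g.modify (pvKey ing) [] (fun v => v ++ [ing]))
            PySem.Dict.empty).items)
        (fun p => p.1)
      = pyGroupby pvKey (PySem.List.sorted ings pvKey) := by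
  have hpwS : ((PySem.List.sorted ings pvKey).map pvKey).Pairwise (fun a b => a ≤ b) :=
    PySem.List.sorted_map_key_pairwise ings pvKey
  have hG : pyGroupby pvKey (PySem.List.sorted ings pvKey)
      = (PySem.List.dedup ((PySem.List.sorted ings pvKey).map pvKey)).map
          (fun c => (c, ings.filter (fun i => pvKey i == c))) := by
    rw [groupby_eq _ hpwS]
    exact List.map_congr_left (fun c _ => by rw [filter_sorted])
  apply PySem.List.sorted_eq_of_perm_of_pairwise_lt
  · rw [hG, itemsA_eq]
    apply List.Perm.map
    apply (List.perm_ext_iff_of_nodup (PySem.List.nodup_dedup _) (PySem.List.nodup_dedup _)).mpr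
    intro c
    rw [PySem.List.mem_dedup, PySem.List.mem_dedup]
    exact ((PySem.List.sorted_perm ings pvKey false).map pvKey).mem_iff
  · rw [hG]
    apply List.pairwise_map.mpr
    have hpd : (PySem.List.dedup ((PySem.List.sorted ings pvKey).map pvKey)).Pairwise (fun a b => a ≤ b) :=
      hpwS.sublist (ofList_sublist _)
    have hnd : (PySem.List.dedup ((PySem.List.sorted ings pvKey).map pvKey)).Pairwise (fun a b => a ≠ b) :=
      PySem.List.nodup_dedup _
    exact (hpd.and hnd).imp (fun h => lt_of_le_of_ne h.1 h.2)

-- ===== VERDICT (by name: the statement is the Claim_ definition above) =====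
theorem build_batches_spec : Claim_equal_build_batches := by
  intro ingredients batch_size done_batch_keys _ _
  unfold Spec_build_batches build_batches build_batches_alt
  rw [sorted_items_eq_groupby]
  congr 1
  funext batches p
  have hswap : (fun (acc : List (String × String × (List (List (String × String)))))
      (ic : Int × List (List (String × String))) =>
        if done_batch_keys.contains (p.1 ++ "_" ++ PySem.Int.toStr ic.1) then acc
        else acc ++ [(p.1 ++ "_" ++ PySem.Int.toStr ic.1, p.1, ic.2)])
      = (fun acc ic =>
        if (!(done_batch_keys.contains (p.1 ++ "_" ++ PySem.Int.toStr ic.1))) = true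
        then acc ++ [(p.1 ++ "_" ++ PySem.Int.toStr ic.1, p.1, ic.2)] else acc) := by
    funext acc ic
    cases done_batch_keys.contains (p.1 ++ "_" ++ PySem.Int.toStr ic.1) <;> simp
  show (PySem.List.enumerate (chunk_list p.2 batch_size) 0).foldl _ batches = _
  rw [hswap, PySem.List.foldl_append_if]
  rfl
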